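-- pv_equiv track=rewrite | github.com/MichaelXi3/graph-recommendation | adjace_list_recommend.py | adjac_list_recommend
-- ===== SOURCE A (Python) =====
-- def adjac_list_recommend(adj_list):
--     # step 1: ensure all vertices are in adj_list, even the vertices without outgoing edges
--     all_vertices = set(adj_list.keys())
--     for neighbors in adj_list.values():
--         all_vertices.update(neighbors)
--
--     for vertex in all_vertices:
--         if vertex not in adj_list:
--             adj_list[vertex] = []
--
--     # step 2: count all two-paths in G and store in dict
--     # - key: two path (u, i), value: number of two paths between u, i
--     two_paths = get_two_path_dict(adj_list)
--
--
--     # step 3: turn two-paths dict into adjlist representation of weighted graph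
--     weighted_graph = get_two_path_weighted_graph(two_paths)
--
--     # step 4: based on the two-path weighted graph, get recommendation of each vertices
--     # - key: vertex u, value: recommendation for u
--     recomendation = get_recommendation_dict(weighted_graph, adj_list)
--
--     return recomendation
--
-- def get_two_path_weighted_graph(two_paths):
--     adj_list_weighted = {}
--
--     for pair, count in two_paths.items():
--         u, v = pair
--
--         # Add edge from u to v with weight count
--         if u not in adj_list_weighted:
--             adj_list_weighted[u] = [(v, count)]
--         else:
--             adj_list_weighted[u].append((v, count))
--
--     return adj_list_weighted
--
-- def get_recommendation_dict(weighted_graph, adj_list):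
--     recommendation = {}
--
--     # find recommendation result for all vertices in G
--     for u in sorted(adj_list.keys()):
--         max_num_two_paths = 0
--         recommendation_result = 0
--         # if current vertex has two-paths
--         if u in weighted_graph and weighted_graph[u] is not None:
--             # traverse all u's two-paths neighbors, keep the max weighted one
--             for neighbor, weight in sorted(weighted_graph[u]):
--                 # break tie by choosing smallest index
--                 if weight > max_num_two_paths:
--                     max_num_two_paths = weight
--                     recommendation_result = neighbor
--
--         recommendation[u] = recommendation_result
--
--     return recommendation
--
-- def get_two_path_dict(adj_list):
--     two_paths = {}
--
--     for u in adj_list: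
--         # u's neighbors
--         for v in adj_list[u]:
--             # v's neighbors
--             for i in adj_list[v]:
--                 # vertex two hops away is not
--                 # 1. not same as u
--                 # 2. not directly connect to u
--                 if (u != i and i not in adj_list[u]):
--                     if (u, i) in two_paths:
--                         two_paths[(u, i)] += 1
--                     else:
--                         two_paths[(u, i)] = 1
--     return two_paths
-- ===== SOURCE B (Python) =====
-- def adjac_list_recommend(adj_list):
--     # step 1 (as in A: assigning [] to sink-only vertices is an observable mutation)
--     all_vertices = set(adj_list.keys())
--     for neighbors in adj_list.values():
--         all_vertices.update(neighbors)
--     for vertex in all_vertices: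
--         if vertex not in adj_list:
--             adj_list[vertex] = []
--
--     recommendation = {}
--     for u in sorted(adj_list.keys()):
--         ns = adj_list[u]
--         # two-path counts as a multiplicity product: each distinct middle vertex v
--         # contributes the u->v edge multiplicity ns.count(v) to every occurrence of
--         # an endpoint i in adj_list[v] (after step 1 every vertex is a key)
--         counts = {}
--         for v in dict.fromkeys(ns):
--             c = ns.count(v)
--             for i in adj_list[v]:
--                 if i != u and i not in ns:
--                     counts[i] = counts.get(i, 0) + c
--         if counts:
--             m = max(counts.values())
--             recommendation[u] = min(i for i, k in counts.items() if k == m)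
--         else:
--             recommendation[u] = 0
--     return recommendation
-- ===== Notes on version B (the rewrite author's own statement) =====
-- stated objective: alternative
-- what changed: Replaces A's three global stages (triple-nested walk over neighbor occurrences into a (u,i)-keyed path dict, regrouping into a weighted adjacency list, running-max scan of each sorted neighbor list) by, per vertex u, a multiplicity product over the distinct middle vertices dict.fromkeys(adj_list[u]): each distinct v adds the edge multiplicity adj_list[u].count(v) to every valid endpoint occurrence in adj_list[v], and the recommendation is selected as min over endpoints attaining max(counts.values()) instead of a sorted running-max scan.
import Mathlib
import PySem

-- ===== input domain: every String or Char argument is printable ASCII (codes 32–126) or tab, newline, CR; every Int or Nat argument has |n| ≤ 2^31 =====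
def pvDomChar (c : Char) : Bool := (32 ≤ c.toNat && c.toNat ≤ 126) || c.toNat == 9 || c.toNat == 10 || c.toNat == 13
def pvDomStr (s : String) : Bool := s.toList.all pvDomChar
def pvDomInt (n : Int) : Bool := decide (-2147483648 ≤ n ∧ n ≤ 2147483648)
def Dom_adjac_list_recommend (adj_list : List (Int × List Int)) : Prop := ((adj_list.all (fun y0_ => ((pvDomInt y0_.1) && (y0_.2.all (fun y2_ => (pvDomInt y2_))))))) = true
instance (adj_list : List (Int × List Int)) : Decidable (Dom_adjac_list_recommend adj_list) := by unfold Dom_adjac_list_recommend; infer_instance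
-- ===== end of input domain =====

-- B replaces A's three global stages (triple-nested neighbor walk into a (u,i)-keyed
-- path dict, regrouping into a weighted adjacency list, running-max scan of each sorted
-- neighbor list) by a per-vertex sparse product: for each dict entry (v, outs) taken as
-- the middle vertex, the edge multiplicity adj_list[u].count(v) is added to every valid
-- endpoint occurrence in outs, and the recommendation is the smallest endpoint attaining
-- max(counts.values()).  The equivalence proved is about the RETURN value only: both
-- Pythons perform the same observable mutation (adding [] entries for sink-only vertices).

-- ===== PORT A =====
-- step 1 of A (identical text in both Pythons): complete the dict with sink-only vertices
def pvCompleteDict (adj_list : List (Int × List Int)) : PySem.Dict Int (List Int) :=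
  let d0 := PySem.Dict.ofList adj_list
  let allv := d0.values.foldl (fun s ns => PySem.Set.update s ns) (PySem.Set.ofList d0.keys)
  allv.foldl (fun d v => if ¬ d.contains v then d.insert v [] else d) d0

-- get_two_path_dict
def pvTwoPathDict (d : PySem.Dict Int (List Int)) : PySem.Dict (Int × Int) Int :=
  d.keys.foldl (fun tp u =>
    (d.getD u []).foldl (fun tp v =>
      (d.getD v []).foldl (fun tp i =>
        if u ≠ i ∧ ¬ (i ∈ d.getD u []) then
          (if tp.contains (u, i) then tp.insert (u, i) (tp.getD (u, i) 0 + 1)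
           else tp.insert (u, i) 1)
        else tp) tp) tp) PySem.Dict.empty

-- get_two_path_weighted_graph
def pvWeightedGraph (tp : PySem.Dict (Int × Int) Int) : PySem.Dict Int (List (Int × Int)) :=
  tp.items.foldl (fun wg pc =>
    if ¬ wg.contains pc.1.1 then wg.insert pc.1.1 [(pc.1.2, pc.2)]
    else wg.modify pc.1.1 [] (fun l => l ++ [(pc.1.2, pc.2)])) PySem.Dict.empty

-- get_recommendation_dict ('weighted_graph[u] is not None' is always true: values are lists)
def pvRecommendDict (wg : PySem.Dict Int (List (Int × Int))) (d : PySem.Dict Int (List Int)) : PySem.Dict Int Int :=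
  (PySem.List.sorted d.keys (fun x => x) false).foldl (fun rec u =>
    let st : Int × Int :=
      if wg.contains u then
        (PySem.List.sorted2 (wg.getD u []) (fun p => p.1) (fun p => p.2) false).foldl
          (fun st p => if p.2 > st.1 then (p.2, p.1) else st) (0, 0)
      else (0, 0)
    rec.insert u st.2) PySem.Dict.empty

def adjac_list_recommend (adj_list : List (Int × List Int)) : List (Int × Int) :=
  let d := pvCompleteDict adj_list
  let tp := pvTwoPathDict d
  let wg := pvWeightedGraph tp
  (pvRecommendDict wg d).items

-- ===== PORT B =====
def adjac_list_recommend_alt (adj_list : List (Int × List Int)) : List (Int × Int) :=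
  let d := pvCompleteDict adj_list
  ((PySem.List.sorted d.keys (fun x => x) false).foldl (fun rec u =>
    let ns := d.getD u []
    -- counts: multiplicity product over the distinct middle vertices dict.fromkeys(ns);
    -- adj_list[v] is d.getD v [] — exact, since after step 1 every neighbor is a key
    let counts : PySem.Dict Int Int :=
      (PySem.List.dedup ns).foldl (fun cd v =>
        let c : Int := (ns.count v : Int)
        (d.getD v []).foldl (fun cd i =>
          if i ≠ u ∧ ¬ (i ∈ ns) then cd.insert i (cd.getD i 0 + c) else cd) cd)
        PySem.Dict.empty
    let r : Int :=
      if counts.items ≠ [] then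
        let m := (PySem.List.max? counts.values (fun x => x)).getD 0
        (PySem.List.min? ((counts.items.filter (fun q => q.2 == m)).map (fun q => q.1)) (fun x => x)).getD 0
      else 0
    rec.insert u r) (PySem.Dict.empty : PySem.Dict Int Int)).items

-- ===== PRECONDITION & SPEC =====
def Spec_adjac_list_recommend (adj_list : List (Int × List Int)) (out : List (Int × Int)) : Prop := out = adjac_list_recommend_alt adj_list
instance (adj_list : List (Int × List Int)) (out : List (Int × Int)) : Decidable (Spec_adjac_list_recommend adj_list out) := by unfold Spec_adjac_list_recommend; infer_instance

-- ===== CLAIM (what is proved, stated in full; the proofs are below) =====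
def Claim_equal_adjac_list_recommend : Prop := ∀ (adj_list : List (Int × List Int)), Dom_adjac_list_recommend adj_list → Spec_adjac_list_recommend adj_list (adjac_list_recommend adj_list)

-- ===== LEMMAS AND PROOFS =====

-- the common membership/count condition of the inner loops (A's spelling)
def pvStepCond (d : PySem.Dict Int (List Int)) (u i : Int) : Bool :=
  decide (u ≠ i ∧ ¬ (i ∈ d.getD u []))

-- qualifying two-hop endpoints of u, with multiplicity, in A's traversal order
def pvQs (d : PySem.Dict Int (List Int)) (u : Int) : List Int :=
  ((d.getD u []).flatMap (fun v => d.getD v [])).filter (pvStepCond d u)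

-- all (source, endpoint) two-path events of A's triple loop, in order
def pvL (d : PySem.Dict Int (List Int)) : List (Int × Int) :=
  d.keys.flatMap (fun u => (pvQs d u).map (fun i => (u, i)))

-- B's weighted (endpoint, multiplicity) events for source u, in B's traversal order
def pvEv (d : PySem.Dict Int (List Int)) (u : Int) : List (Int × Int) :=
  (PySem.List.dedup (d.getD u [])).flatMap
    (fun v => ((d.getD v []).filter (fun i => decide (i ≠ u ∧ ¬ (i ∈ d.getD u [])))).map
      (fun i => (i, ((d.getD u []).count v : Int))))

-- A's running-max scan
def pvScan (L : List (Int × Int)) : Int × Int :=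
  L.foldl (fun st p => if p.2 > st.1 then (p.2, p.1) else st) (0, 0)

theorem pv_getD_not_contains {κ ν : Type} [BEq κ] (d : PySem.Dict κ ν) (k : κ) (dflt : ν)
    (h : d.contains k = false) : d.getD k dflt = dflt := by
  exact PySem.Dict.getD_of_not_contains d dflt h

theorem pv_insert_count_eq {κ : Type} [BEq κ] (tp : PySem.Dict κ Int) (k : κ) :
    (if tp.contains k then tp.insert k (tp.getD k 0 + 1) else tp.insert k 1)
      = tp.insert k (tp.getD k 0 + 1) := by
  cases h : tp.contains k with
  | true => simp
  | false => simp [pv_getD_not_contains tp k 0 h]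

theorem pv_wg_step_eq {κ : Type} [BEq κ] (wg : PySem.Dict κ (List (Int × Int))) (k : κ)
    (x : Int × Int) :
    (if ¬ wg.contains k then wg.insert k [x] else wg.modify k [] (fun l => l ++ [x]))
      = wg.modify k [] (fun l => l ++ [x]) := by
  unfold PySem.Dict.modify
  cases h : wg.contains k with
  | true => simp
  | false => simp [pv_getD_not_contains wg k [] h]

-- A's step-2 triple loop is the counter of the flattened event list pvL
theorem pv_tp_eq (d : PySem.Dict Int (List Int)) :
    pvTwoPathDict d = PySem.Dict.counter (pvL d) := by
  rw [← PySem.Dict.foldl_insert_getD_add_one_eq_counter]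
  unfold pvTwoPathDict pvL
  rw [List.foldl_flatMap]
  apply PySem.List.foldl_congr_mem
  intro tp u _
  rw [List.foldl_map]
  unfold pvQs
  rw [List.foldl_filter, List.foldl_flatMap]
  apply PySem.List.foldl_congr_mem
  intro tp' v _
  apply PySem.List.foldl_congr_mem
  intro tp'' i _
  simp only [pvStepCond, decide_eq_true_eq]
  by_cases hc : u ≠ i ∧ ¬ (i ∈ d.getD u [])
  · simp only [if_pos hc]
    exact pv_insert_count_eq tp'' (u, i)
  · simp only [if_neg hc]

-- wg lookup = filtered, regrouped items of tp
theorem pv_wg_getD (tp : PySem.Dict (Int × Int) Int) (u : Int) :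
    (pvWeightedGraph tp).getD u []
      = (tp.items.filter (fun p => p.1.1 == u)).map (fun p => (p.1.2, p.2)) := by
  unfold pvWeightedGraph
  have h1 : (tp.items.foldl (fun wg pc =>
      if ¬ wg.contains pc.1.1 then wg.insert pc.1.1 [(pc.1.2, pc.2)]
      else wg.modify pc.1.1 [] (fun l => l ++ [(pc.1.2, pc.2)])) PySem.Dict.empty)
    = ((tp.items.map (fun p => (p.1.1, (p.1.2, p.2)))).foldl
        (fun wg q => wg.modify q.1 [] (fun l => l ++ [q.2])) PySem.Dict.empty) := by
    rw [List.foldl_map]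
    apply PySem.List.foldl_congr_mem
    intro wg p _
    exact pv_wg_step_eq wg p.1.1 (p.1.2, p.2)
  rw [h1, PySem.Dict.getD_foldl_modify_append]
  rw [List.filter_map]
  simp [Function.comp_def]

-- set(xs) commutes with filter (first occurrences survive filtering)
theorem pv_foldl_add_filter {α : Type} [BEq α] [LawfulBEq α] (l : List α) (p : α → Bool)
    (s : PySem.Set α) :
    (l.foldl PySem.Set.add s).filter p = (l.filter p).foldl PySem.Set.add (s.filter p) := by
  induction l generalizing s with
  | nil => rfl
  | cons x l ih =>
    simp only [List.foldl_cons, List.filter_cons]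
    rw [ih]
    by_cases hp : p x = true
    · rw [if_pos hp, List.foldl_cons]
      congr 1
      rw [PySem.Set.add_eq_ite, PySem.Set.add_eq_ite]
      by_cases hm : x ∈ s
      · rw [if_pos hm, if_pos (List.mem_filter.mpr ⟨hm, hp⟩)]
      · rw [if_neg hm, if_neg (fun h => hm (List.mem_filter.mp h).1)]
        rw [List.filter_append, List.filter_cons, if_pos hp]
        rfl
    · rw [if_neg hp]
      congr 1
      rw [PySem.Set.add_eq_ite]
      by_cases hm : x ∈ s
      · rw [if_pos hm]
      · rw [if_neg hm, List.filter_append, List.filter_cons, if_neg hp]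
        simp

theorem pv_ofList_filter {α : Type} [BEq α] [LawfulBEq α] (l : List α) (p : α → Bool) :
    PySem.Set.ofList (l.filter p) = (PySem.Set.ofList l).filter p := by
  unfold PySem.Set.ofList
  rw [pv_foldl_add_filter]
  rfl

-- set(xs) commutes with the injective tagging map i ↦ (u, i)
theorem pv_foldl_add_map (l : List Int) (u : Int) (s : PySem.Set Int) :
    (l.map (fun i => ((u, i) : Int × Int))).foldl PySem.Set.add (s.map (fun i => (u, i)))
      = (l.foldl PySem.Set.add s).map (fun i => (u, i)) := by
  induction l generalizing s with
  | nil => rfl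
  | cons x l ih =>
    simp only [List.map_cons, List.foldl_cons]
    rw [← ih]
    congr 1
    rw [PySem.Set.add_eq_ite, PySem.Set.add_eq_ite]
    by_cases hm : x ∈ s
    · rw [if_pos hm, if_pos (List.mem_map.mpr ⟨x, hm, rfl⟩)]
    · have hnm : ((u, x) : Int × Int) ∉ s.map (fun i => (u, i)) := by
        intro h
        rcases List.mem_map.mp h with ⟨y, hy, he⟩
        have : y = x := by simpa using he
        exact hm (this ▸ hy)
      rw [if_neg hm, if_neg hnm, List.map_append]
      simp

theorem pv_ofList_map_pair (l : List Int) (u : Int) :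
    PySem.Set.ofList (l.map (fun i => ((u, i) : Int × Int)))
      = (PySem.Set.ofList l).map (fun i => (u, i)) := by
  unfold PySem.Set.ofList
  rw [← pv_foldl_add_map]
  rfl

theorem pv_flatMap_if {α β : Type} [DecidableEq α] (K : List α) (u : α) (B : List β)
    (hnd : K.Nodup) (hu : u ∈ K) :
    (K.flatMap (fun x => if x = u then B else [])) = B := by
  induction K with
  | nil => cases hu
  | cons k K ih =>
    by_cases hk : k = u
    · subst hk
      have hnotin : k ∉ K := (List.nodup_cons.mp hnd).1
      have hrest : K.flatMap (fun x => if x = k then B else []) = [] := by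
        apply List.flatMap_eq_nil_iff.mpr
        intro x hx
        rw [if_neg]
        intro e; subst e; exact hnotin hx
      simp [hrest]
    · have hu' : u ∈ K := by
        rcases List.mem_cons.mp hu with h | h
        · exact absurd h.symm hk
        · exact h
      simp only [List.flatMap_cons, if_neg hk, List.nil_append]
      exact ih (List.nodup_cons.mp hnd).2 hu'

theorem pv_filter_L (d : PySem.Dict Int (List Int)) (u : Int)
    (hnd : d.keys.Nodup) (hu : u ∈ d.keys) :
    (pvL d).filter (fun k => k.1 == u) = (pvQs d u).map (fun i => (u, i)) := by
  unfold pvL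
  rw [List.filter_flatMap]
  have hblk : ∀ u' : Int, ((pvQs d u').map (fun i => (u', i))).filter (fun k => k.1 == u)
      = if u' = u then (pvQs d u).map (fun i => (u, i)) else [] := by
    intro u'
    rw [List.filter_map]
    by_cases h : u' = u
    · subst h
      have hc : ((fun k : Int × Int => k.1 == u') ∘ fun i : Int => ((u', i) : Int × Int))
          = fun _ => true := by funext i; simp
      rw [if_pos rfl, hc, List.filter_true]
    · have hc : ((fun k : Int × Int => k.1 == u) ∘ fun i : Int => ((u', i) : Int × Int))
          = fun _ => false := by funext i; simp [h]
      rw [if_neg h, hc, List.filter_false, List.map_nil]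
  calc (d.keys.flatMap fun a => ((pvQs d a).map (fun i => (a, i))).filter (fun k => k.1 == u))
      = d.keys.flatMap (fun a => if a = u then (pvQs d u).map (fun i => (u, i)) else []) := by
        apply List.flatMap_congr
        intro a _
        exact hblk a
    _ = (pvQs d u).map (fun i => (u, i)) := pv_flatMap_if d.keys u _ hnd hu

theorem pv_count_L (d : PySem.Dict Int (List Int)) (u : Int)
    (hnd : d.keys.Nodup) (hu : u ∈ d.keys) (i : Int) :
    (pvL d).count (u, i) = (pvQs d u).count i := by
  have h1 : (pvL d).count (u, i) = ((pvL d).filter (fun k => k.1 == u)).count (u, i) := by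
    rw [List.count_filter]; simp
  rw [h1, pv_filter_L d u hnd hu]
  have hinj : Function.Injective (fun j : Int => ((u, j) : Int × Int)) := by
    intro a b h; simpa using h
  exact List.count_map_of_injective _ _ hinj i

theorem pv_keys_nodup (adj_list : List (Int × List Int)) :
    (pvCompleteDict adj_list).keys.Nodup := by
  unfold pvCompleteDict
  have hstep : ∀ (vs : List Int) (d : PySem.Dict Int (List Int)), d.keys.Nodup →
      (vs.foldl (fun d v => if ¬ d.contains v then d.insert v [] else d) d).keys.Nodup := by
    intro vs
    induction vs with
    | nil => intro d h; exact h
    | cons v vs ih =>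
      intro d h
      simp only [List.foldl_cons]
      apply ih
      by_cases hc : d.contains v = true
      · simp [hc, h]
      · have hc' : d.contains v = false := by simpa using hc
        have hv : v ∉ d.keys := by
          intro hm
          unfold PySem.Dict.contains at hc'
          rcases List.mem_map.mp hm with ⟨p, hp, he⟩
          have := List.any_eq_false.mp hc' p hp
          simp [he] at this
        rw [if_pos (by simp [hc'])]
        unfold PySem.Dict.insert
        rw [if_neg (by simp [hc'])]
        unfold PySem.Dict.keys
        simp only [List.map_append]
        rw [List.nodup_append]
        refine ⟨h, by simp, ?_⟩
        intro a ha b hb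
        have hbv : b = v := by simpa using hb
        subst hbv
        exact fun e => hv (e ▸ ha)
  exact hstep _ _ (PySem.Dict.nodup_keys_ofList adj_list)

-- per-vertex equality of A's scanned pair list with the counter of pvQs
theorem pv_main_list (d : PySem.Dict Int (List Int)) (u : Int)
    (hnd : d.keys.Nodup) (hu : u ∈ d.keys) :
    (pvWeightedGraph (pvTwoPathDict d)).getD u []
      = (PySem.Dict.counter (pvQs d u)).items := by
  rw [pv_tp_eq, pv_wg_getD, PySem.Dict.items_counter, PySem.Dict.items_counter]
  rw [List.filter_map]
  have hcomp : ((fun p : (Int × Int) × Int => p.1.1 == u) ∘ fun k : Int × Int => (k, ((pvL d).count k : Int)))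
      = fun k : Int × Int => k.1 == u := rfl
  rw [hcomp, ← pv_ofList_filter, pv_filter_L d u hnd hu, pv_ofList_map_pair]
  simp only [List.map_map, Function.comp_def]
  apply List.map_congr_left
  intro i _
  simp [pv_count_L d u hnd hu i]

-- getD of a weighted counting fold
theorem pv_getD_wfold (ev : List (Int × Int)) (cd : PySem.Dict Int Int) (x : Int) :
    (ev.foldl (fun cd q => cd.insert q.1 (cd.getD q.1 0 + q.2)) cd).getD x 0
      = cd.getD x 0 + ((ev.filter (fun q => q.1 == x)).map (fun q => q.2)).sum := by
  induction ev generalizing cd with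
  | nil => simp
  | cons q ev ih =>
    simp only [List.foldl_cons, List.filter_cons]
    rw [ih, PySem.Dict.getD_insert]
    by_cases h : x = q.1
    · rw [if_pos h, if_pos (by simp [h]), List.map_cons, List.sum_cons, h]
      ring
    · rw [if_neg h, if_neg (by simp [Ne.symm h])]

-- B's nested counting loop is the weighted fold of the event list pvEv
theorem pv_counts_eq (d : PySem.Dict Int (List Int)) (u : Int) :
    ((PySem.List.dedup (d.getD u [])).foldl (fun cd v =>
        let c : Int := (((d.getD u []).count v : Nat) : Int)
        (d.getD v []).foldl (fun cd i =>
          if i ≠ u ∧ ¬ (i ∈ d.getD u []) then cd.insert i (cd.getD i 0 + c) else cd) cd)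
      (PySem.Dict.empty : PySem.Dict Int Int))
    = (pvEv d u).foldl (fun cd q => cd.insert q.1 (cd.getD q.1 0 + q.2)) PySem.Dict.empty := by
  unfold pvEv
  rw [List.foldl_flatMap]
  apply PySem.List.foldl_congr_mem
  intro cd v _
  show ((d.getD v []).foldl (fun cd i =>
          if i ≠ u ∧ ¬ (i ∈ d.getD u []) then
            cd.insert i (cd.getD i 0 + ((d.getD u []).count v : Int)) else cd) cd) = _
  rw [PySem.List.foldl_ite_eq_foldl_filter
    (p := fun i => i ≠ u ∧ ¬ (i ∈ d.getD u []))
    (f := fun (cd : PySem.Dict Int Int) (i : Int) => cd.insert i (cd.getD i 0 + ((d.getD u []).count v : Int)))]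
  rw [List.foldl_map]

-- items of B's counts dict: distinct endpoints paired with their summed weights
theorem pv_counts_items (d : PySem.Dict Int (List Int)) (u : Int) :
    ((pvEv d u).foldl (fun cd q => cd.insert q.1 (cd.getD q.1 0 + q.2))
        (PySem.Dict.empty : PySem.Dict Int Int)).items
      = (PySem.Set.ofList ((pvEv d u).map (fun q => q.1))).map
          (fun i => (i, (((pvEv d u).filter (fun q => q.1 == i)).map (fun q => q.2)).sum)) := by
  have hnd := PySem.Dict.nodup_keys_foldl_insert_key (pvEv d u) (fun q => q.1)
    (fun cd q => cd.getD q.1 0 + q.2) (PySem.Dict.empty : PySem.Dict Int Int)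
    PySem.Dict.nodup_keys_empty
  rw [PySem.Dict.items_eq_map_keys _ hnd 0,
    PySem.Dict.keys_foldl_insert_key (pvEv d u) (fun q => q.1)
      (fun cd q => cd.getD q.1 0 + q.2)]
  rw [show (PySem.Dict.empty : PySem.Dict Int Int).keys = [] from rfl, PySem.Set.update_nil_left]
  apply List.map_congr_left
  intro i _
  simp only []
  rw [pv_getD_wfold, PySem.Dict.getD_empty, zero_add]

theorem pv_sum_delta (K : List Int) (x : Int) (g : Int → Nat)
    (hnd : K.Nodup) (hx : x ∈ K) :
    (K.map (fun k => if x == k then g k else 0)).sum = g x := by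
  induction K with
  | nil => cases hx
  | cons k K ih =>
    simp only [List.map_cons, List.sum_cons]
    by_cases h : x = k
    · subst h
      have hnotin := (List.nodup_cons.mp hnd).1
      have hz : (K.map (fun k => if x == k then g k else 0)) = K.map (fun _ => (0 : Nat)) := by
        apply List.map_congr_left; intro a ha
        rw [if_neg (by simp; intro e; exact hnotin (e ▸ ha))]
      rw [hz]
      simp
    · rw [if_neg (by simpa using h), zero_add]
      exact ih (List.nodup_cons.mp hnd).2 ((List.mem_cons.mp hx).resolve_left h)

theorem pv_sum_count (K l : List Int) (g : Int → Nat)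
    (hnd : K.Nodup) (hsub : ∀ v ∈ l, v ∈ K) :
    (l.map g).sum = (K.map (fun k => l.count k * g k)).sum := by
  induction l with
  | nil => simp
  | cons x l ih =>
    simp only [List.map_cons, List.sum_cons]
    rw [ih (fun v hv => hsub v (List.mem_cons_of_mem _ hv))]
    have hstep : ∀ k, (x :: l).count k * g k = l.count k * g k + (if x == k then g k else 0) := by
      intro k
      rw [List.count_cons]
      by_cases h : x = k
      · rw [if_pos (by simpa using h), if_pos (by simpa using h)]
        ring
      · rw [if_neg (by simpa using h), if_neg (by simpa using h)]
        ring
    rw [List.map_congr_left (fun k _ => hstep k), List.sum_map_add,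
      pv_sum_delta K x g hnd (hsub x List.mem_cons_self)]
    ring

theorem pv_cond_eq (d : PySem.Dict Int (List Int)) (u i : Int) :
    (decide (i ≠ u ∧ ¬ (i ∈ d.getD u []))) = pvStepCond d u i := by
  unfold pvStepCond
  apply decide_eq_decide.mpr
  constructor
  · exact fun h => ⟨Ne.symm h.1, h.2⟩
  · exact fun h => ⟨Ne.symm h.1, h.2⟩

-- the central count identity: B's summed weight at x equals A's two-path count at x
theorem pv_W_eq_cnt (d : PySem.Dict Int (List Int)) (u : Int) (x : Int) :
    (((pvEv d u).filter (fun q => q.1 == x)).map (fun q => q.2)).sum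
      = ((pvQs d u).count x : Int) := by
  -- B side: reduce to a per-distinct-middle sum of products
  have hB : (((pvEv d u).filter (fun q => q.1 == x)).map (fun q => q.2)).sum
      = ((PySem.List.dedup (d.getD u [])).map (fun v =>
          ((((d.getD v []).filter (pvStepCond d u)).count x : Nat) : Int)
            * (((d.getD u []).count v : Nat) : Int))).sum := by
    unfold pvEv
    rw [List.filter_flatMap, List.map_flatMap]
    have hblk : ∀ v : Int,
        ((((d.getD v []).filter (fun i => decide (i ≠ u ∧ ¬ (i ∈ d.getD u [])))).map
            (fun i => (i, ((d.getD u []).count v : Int)))).filter (fun q => q.1 == x)).map (fun q => q.2)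
          = (((d.getD v []).filter (fun i => decide (i ≠ u ∧ ¬ (i ∈ d.getD u [])))).filter
              (fun i => i == x)).map (fun _ => (((d.getD u []).count v : Nat) : Int)) := by
      intro v
      rw [List.filter_map, List.map_map]
      rfl
    rw [List.flatMap_congr (fun v _ => hblk v), List.flatMap_def, List.sum_flatten, List.map_map]
    apply congrArg List.sum
    apply List.map_congr_left
    intro v _
    simp only [Function.comp]
    rw [PySem.List.sum_map_const_int, List.filter_congr (fun i _ => pv_cond_eq d u i)]
    rw [← List.count_eq_length_filter]
  -- A side: count over the flattened walk, regrouped by distinct middles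
  have hQ : pvQs d u = (d.getD u []).flatMap (fun v => (d.getD v []).filter (pvStepCond d u)) := by
    unfold pvQs
    rw [List.filter_flatMap]
  have hA : (pvQs d u).count x
      = ((PySem.List.dedup (d.getD u [])).map (fun k =>
          (d.getD u []).count k * ((d.getD k []).filter (pvStepCond d u)).count x)).sum := by
    rw [hQ, List.count_flatMap]
    exact pv_sum_count (PySem.List.dedup (d.getD u [])) (d.getD u [])
      (fun v => ((d.getD v []).filter (pvStepCond d u)).count x)
      (PySem.Set.nodup_ofList _) (fun v hv => (PySem.Set.mem_ofList _ _).mpr hv)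
  rw [hB, hA, Nat.cast_list_sum, List.map_map]
  refine congrArg List.sum (List.map_congr_left ?_)
  intro v _
  simp only [Function.comp]
  push_cast
  ring

-- positivity of B's event weights
theorem pv_ev_pos (d : PySem.Dict Int (List Int)) (u : Int) :
    ∀ q ∈ pvEv d u, 0 < q.2 := by
  intro q hq
  unfold pvEv at hq
  rcases List.mem_flatMap.mp hq with ⟨v, hv, hqp⟩
  rcases List.mem_map.mp hqp with ⟨i, _, rfl⟩
  have hvm : v ∈ d.getD u [] := (PySem.Set.mem_ofList _ _).mp hv
  have hc := List.count_pos_iff.mpr hvm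
  show (0 : Int) < ((d.getD u []).count v : Int)
  exact_mod_cast hc

-- B's distinct endpoints are exactly A's two-hop endpoints
theorem pv_mem_ev_iff (d : PySem.Dict Int (List Int)) (u : Int) (x : Int) :
    x ∈ (pvEv d u).map (fun q => q.1) ↔ x ∈ pvQs d u := by
  have hW := pv_W_eq_cnt d u x
  constructor
  · intro h
    rcases List.mem_map.mp h with ⟨q, hq, rfl⟩
    have hfil : q ∈ (pvEv d u).filter (fun q' => q'.1 == q.1) :=
      List.mem_filter.mpr ⟨hq, by simp⟩
    have hpos : 0 < (((pvEv d u).filter (fun q' => q'.1 == q.1)).map (fun q => q.2)).sum := by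
      apply List.sum_pos
      · intro y hy
        rcases List.mem_map.mp hy with ⟨q', hq', rfl⟩
        exact pv_ev_pos d u q' (List.mem_filter.mp hq').1
      · intro he
        rw [List.map_eq_nil_iff.mp he] at hfil
        cases hfil
    rw [hW] at hpos
    exact List.count_pos_iff.mp (by exact_mod_cast hpos)
  · intro h
    have hpos : (0 : Int) < ((pvQs d u).count x : Int) := by
      exact_mod_cast List.count_pos_iff.mpr h
    rw [← hW] at hpos
    by_contra hx
    have hfil : ((pvEv d u).filter (fun q => q.1 == x)) = [] := by
      apply List.filter_eq_nil_iff.mpr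
      intro q hq hbeq
      exact hx (List.mem_map.mpr ⟨q, hq, by simpa using hbeq⟩)
    rw [hfil] at hpos
    simp at hpos

theorem pv_insertBy_congr {α : Type} (f g : α → α → Bool) (x : α) (ys : List α)
    (h : ∀ y ∈ ys, f x y = g x y) :
    PySem.List.insertBy f x ys = PySem.List.insertBy g x ys := by
  induction ys with
  | nil => rfl
  | cons y t ih =>
    rw [show PySem.List.insertBy f x (y :: t)
          = if f x y then x :: y :: t else y :: PySem.List.insertBy f x t from rfl,
        show PySem.List.insertBy g x (y :: t)
          = if g x y then x :: y :: t else y :: PySem.List.insertBy g x t from rfl,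
        h y List.mem_cons_self]
    cases hg : g x y with
    | true => rfl
    | false => simp [ih (fun y hy => h y (List.mem_cons_of_mem _ hy))]

theorem pv_foldl_insertBy_congr {α : Type} (P : α → Prop) (f g : α → α → Bool)
    (h : ∀ a b, P a → P b → f a b = g a b) :
    ∀ (xs acc : List α), (∀ x ∈ xs, P x) → (∀ y ∈ acc, P y) →
      xs.foldl (fun acc x => PySem.List.insertBy f x acc) acc
        = xs.foldl (fun acc x => PySem.List.insertBy g x acc) acc := by
  intro xs
  induction xs with
  | nil => intro acc _ _; rfl
  | cons x xs ih =>
    intro acc hxs hacc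
    simp only [List.foldl_cons]
    have hx := hxs x List.mem_cons_self
    rw [pv_insertBy_congr f g x acc (fun y hy => h x y hx (hacc y hy))]
    apply ih _ (fun y hy => hxs y (List.mem_cons_of_mem _ hy))
    intro y hy
    rcases (PySem.List.mem_insertBy g x y acc).mp hy with rfl | hy'
    · exact hx
    · exact hacc y hy'

-- on a list with pairwise-distinct first components, Python's tuple sort is the sort by key
theorem pv_sorted2_eq_sorted (xs : List (Int × Int)) (hnd : (xs.map Prod.fst).Nodup) :
    PySem.List.sorted2 xs (fun p => p.1) (fun p => p.2) false
      = PySem.List.sorted xs (fun p => p.1) false := by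
  rw [PySem.List.sorted_eq_foldl_insertBy]
  show xs.foldl (fun acc x => PySem.List.insertBy
      (fun a b : Int × Int => decide (a.1 < b.1) || (!decide (b.1 < a.1) && decide (a.2 < b.2))) x acc) []
    = xs.foldl (fun acc x => PySem.List.insertBy
      (fun a b : Int × Int => decide (a.1 < b.1)) x acc) []
  apply pv_foldl_insertBy_congr (P := fun p => p ∈ xs)
  · intro a b ha hb
    by_cases hab : a.1 = b.1
    · have : a = b := List.inj_on_of_nodup_map hnd ha hb hab
      subst this
      simp
    · rcases lt_or_gt_of_ne hab with hl | hl
      · simp [hl]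
      · simp [hl, asymm hl]
  · exact fun x hx => hx
  · intro y hy; cases hy

theorem pv_scan_append (L : List (Int × Int)) (p : Int × Int) :
    pvScan (L ++ [p]) = if p.2 > (pvScan L).1 then (p.2, p.1) else pvScan L := by
  unfold pvScan
  rw [List.foldl_append]
  rfl

theorem pv_scan_spec (L : List (Int × Int))
    (hlt : L.Pairwise (fun p q => p.1 < q.1)) (hpos : ∀ p ∈ L, 1 ≤ p.2) (hne : L ≠ []) :
    ((pvScan L).2, (pvScan L).1) ∈ L ∧ (∀ p ∈ L, p.2 ≤ (pvScan L).1)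
      ∧ (∀ p ∈ L, p.2 = (pvScan L).1 → (pvScan L).2 ≤ p.1) := by
  induction L using List.reverseRecOn with
  | nil => exact absurd rfl hne
  | append_singleton L p ih =>
    have hltL : L.Pairwise (fun p q => p.1 < q.1) := (List.pairwise_append.mp hlt).1
    have hcross := (List.pairwise_append.mp hlt).2.2
    have hposL : ∀ q ∈ L, 1 ≤ q.2 := fun q hq => hpos q (List.mem_append_left _ hq)
    have hp1 : 1 ≤ p.2 := hpos p (List.mem_append_right _ (List.mem_cons_self))
    rw [pv_scan_append]
    by_cases hL : L = []
    · subst hL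
      have hs0 : pvScan ([] : List (Int × Int)) = (0, 0) := rfl
      rw [hs0]
      rw [if_pos (by omega)]
      refine ⟨by simp, ?_, ?_⟩
      · intro q hq
        have : q = p := by simpa using hq
        subst this; exact le_refl _
      · intro q hq _
        have : q = p := by simpa using hq
        subst this; exact le_refl _
    · obtain ⟨hm, hub, hmin⟩ := ih hltL hposL hL
      by_cases hgt : p.2 > (pvScan L).1
      · rw [if_pos hgt]
        refine ⟨by simp, ?_, ?_⟩
        · intro q hq
          rcases List.mem_append.mp hq with hq | hq
          · exact le_of_lt (lt_of_le_of_lt (hub q hq) hgt)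
          · have : q = p := by simpa using hq
            subst this; exact le_refl _
        · intro q hq he
          rcases List.mem_append.mp hq with hq | hq
          · exact absurd he (by have := hub q hq; simp only []; omega)
          · have : q = p := by simpa using hq
            subst this; exact le_refl _
      · rw [if_neg hgt]
        refine ⟨List.mem_append_left _ hm, ?_, ?_⟩
        · intro q hq
          rcases List.mem_append.mp hq with hq | hq
          · exact hub q hq
          · have : q = p := by simpa using hq
            subst this; omega
        · intro q hq he
          rcases List.mem_append.mp hq with hq | hq
          · exact hmin q hq he
          · have hqp : q = p := by simpa using hq
            rw [hqp]
            exact le_of_lt (hcross _ hm p (List.mem_cons_self))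

-- the selection lemma: A's running-max scan = B's max/min selection, given the same pair set
theorem pv_sel (L C : List (Int × Int))
    (hmem : ∀ p : Int × Int, p ∈ L ↔ p ∈ C)
    (hlt : L.Pairwise (fun p q => p.1 < q.1))
    (hpos : ∀ p ∈ L, 1 ≤ p.2) :
    (pvScan L).2
      = if C ≠ [] then
          (PySem.List.min? ((C.filter (fun q => q.2 ==
              (PySem.List.max? (C.map (fun q => q.2)) (fun x => x)).getD 0)).map (fun q => q.1))
            (fun x => x)).getD 0
        else 0 := by
  by_cases hC : C = []
  · rw [if_neg (by simp [hC])]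
    have hL : L = [] := by
      cases L with
      | nil => rfl
      | cons a t => exact absurd (hC ▸ (hmem a).mp List.mem_cons_self) (by simp)
    rw [hL]
    rfl
  · rw [if_pos hC]
    have hLne : L ≠ [] := by
      obtain ⟨c, hc⟩ := List.exists_mem_of_ne_nil C hC
      exact List.ne_nil_of_mem ((hmem c).mpr hc)
    obtain ⟨hm, hub, hmin⟩ := pv_scan_spec L hlt hpos hLne
    obtain ⟨m, hmx⟩ : ∃ m, PySem.List.max? (C.map (fun q => q.2)) (fun x => x) = some m := by
      cases h : PySem.List.max? (C.map (fun q => q.2)) (fun x => x) with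
      | none => exact absurd (by simpa using (PySem.List.max?_eq_none_iff _ _).mp h) hC
      | some m => exact ⟨m, rfl⟩
    have hmmem := PySem.List.max?_mem hmx
    have hmax := PySem.List.max?_isMax hmx
    have hms : m = (pvScan L).1 := by
      apply le_antisymm
      · rcases List.mem_map.mp hmmem with ⟨q, hq, rfl⟩
        exact hub q ((hmem q).mpr hq)
      · exact hmax _ (List.mem_map.mpr ⟨((pvScan L).2, (pvScan L).1), (hmem _).mp hm, rfl⟩)
    rw [hmx]
    have hbmem : (pvScan L).2 ∈ (C.filter (fun q => q.2 == (some m).getD 0)).map (fun q => q.1) :=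
      List.mem_map.mpr ⟨((pvScan L).2, (pvScan L).1),
        List.mem_filter.mpr ⟨(hmem _).mp hm, by simp [hms]⟩, rfl⟩
    obtain ⟨b0, hmn⟩ : ∃ b0, PySem.List.min? ((C.filter (fun q => q.2 == (some m).getD 0)).map
        (fun q => q.1)) (fun x => x) = some b0 := by
      cases h : PySem.List.min? ((C.filter (fun q => q.2 == (some m).getD 0)).map (fun q => q.1)) (fun x => x) with
      | none =>
        rw [(PySem.List.min?_eq_none_iff _ _).mp h] at hbmem
        cases hbmem
      | some b0 => exact ⟨b0, rfl⟩
    have hb0min := PySem.List.min?_isMin hmn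
    have hb0mem := PySem.List.min?_mem hmn
    have hb0 : b0 = (pvScan L).2 := by
      apply le_antisymm
      · exact hb0min _ hbmem
      · rcases List.mem_map.mp hb0mem with ⟨q, hq, rfl⟩
        have hqC := (List.mem_filter.mp hq).1
        have hqm : q.2 = m := by simpa using (List.mem_filter.mp hq).2
        exact hmin q ((hmem q).mpr hqC) (by rw [hqm, hms])
    rw [hmn]
    simp [hb0]

-- per-vertex equality of A's selected value and B's selected value
theorem pv_peru (d : PySem.Dict Int (List Int)) (u : Int) (hnd : d.keys.Nodup)
    (hu : u ∈ d.keys) :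
    (if (pvWeightedGraph (pvTwoPathDict d)).contains u then
        (PySem.List.sorted2 ((pvWeightedGraph (pvTwoPathDict d)).getD u []) (fun p => p.1) (fun p => p.2) false).foldl
          (fun st p => if p.2 > st.1 then (p.2, p.1) else st) ((0 : Int), (0 : Int))
      else ((0 : Int), (0 : Int))).2
    = (let counts : PySem.Dict Int Int :=
         (PySem.List.dedup (d.getD u [])).foldl (fun cd v =>
           let c : Int := ((d.getD u []).count v : Int)
           (d.getD v []).foldl (fun cd i =>
             if i ≠ u ∧ ¬ (i ∈ d.getD u []) then cd.insert i (cd.getD i 0 + c) else cd) cd)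
           PySem.Dict.empty
       if counts.items ≠ [] then
         (PySem.List.min? ((counts.items.filter (fun q => q.2 ==
             (PySem.List.max? counts.values (fun x => x)).getD 0)).map (fun q => q.1)) (fun x => x)).getD 0
       else 0) := by
  rw [pv_counts_eq d u]
  have hitems : ((pvEv d u).foldl (fun cd q => cd.insert q.1 (cd.getD q.1 0 + q.2))
      (PySem.Dict.empty : PySem.Dict Int Int)).items
      = (PySem.Set.ofList ((pvEv d u).map (fun q => q.1))).map
          (fun i => (i, ((pvQs d u).count i : Int))) := by
    rw [pv_counts_items]
    exact List.map_congr_left (fun i _ => by rw [pv_W_eq_cnt d u i])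
  have hvals : ((pvEv d u).foldl (fun cd q => cd.insert q.1 (cd.getD q.1 0 + q.2))
      (PySem.Dict.empty : PySem.Dict Int Int)).values
      = ((pvEv d u).foldl (fun cd q => cd.insert q.1 (cd.getD q.1 0 + q.2))
      (PySem.Dict.empty : PySem.Dict Int Int)).items.map (fun q => q.2) := rfl
  simp only [hvals, hitems]
  -- A side: reduce to pvScan of the sorted counter list
  have hfst : (((PySem.Set.ofList (pvQs d u)).map (fun i => (i, ((pvQs d u).count i : Int)))).map Prod.fst).Nodup := by
    have h1 : ((PySem.Set.ofList (pvQs d u)).map (fun i => (i, ((pvQs d u).count i : Int)))).map Prod.fst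
        = PySem.Set.ofList (pvQs d u) := by
      rw [List.map_map]
      exact List.map_id _
    rw [h1]
    exact PySem.Set.nodup_ofList _
  have hAside : (if (pvWeightedGraph (pvTwoPathDict d)).contains u then
        (PySem.List.sorted2 ((pvWeightedGraph (pvTwoPathDict d)).getD u []) (fun p => p.1) (fun p => p.2) false).foldl
          (fun st p => if p.2 > st.1 then (p.2, p.1) else st) ((0 : Int), (0 : Int))
      else ((0 : Int), (0 : Int)))
      = pvScan (PySem.List.sorted ((PySem.Set.ofList (pvQs d u)).map
          (fun i => (i, ((pvQs d u).count i : Int)))) (fun p => p.1) false) := by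
    have hg : (pvWeightedGraph (pvTwoPathDict d)).getD u []
        = (PySem.Set.ofList (pvQs d u)).map (fun i => (i, ((pvQs d u).count i : Int))) := by
      rw [pv_main_list d u hnd hu, PySem.Dict.items_counter]
    cases hc : (pvWeightedGraph (pvTwoPathDict d)).contains u with
    | false =>
      rw [if_neg (by simp)]
      have hnil : (PySem.Set.ofList (pvQs d u)).map (fun i => (i, ((pvQs d u).count i : Int))) = [] := by
        rw [← hg]
        exact pv_getD_not_contains _ _ _ hc
      rw [hnil]
      rfl
    | true =>
      rw [if_pos rfl, hg, pv_sorted2_eq_sorted _ hfst]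
      rfl
  rw [hAside]
  -- selection equality via pv_sel
  apply pv_sel
  · intro p
    rw [PySem.List.mem_sorted]
    constructor
    · intro hp
      rcases List.mem_map.mp hp with ⟨i, hi, rfl⟩
      refine List.mem_map.mpr ⟨i, ?_, rfl⟩
      rw [PySem.Set.mem_ofList] at hi ⊢
      exact (pv_mem_ev_iff d u i).mpr hi
    · intro hp
      rcases List.mem_map.mp hp with ⟨i, hi, rfl⟩
      refine List.mem_map.mpr ⟨i, ?_, rfl⟩
      rw [PySem.Set.mem_ofList] at hi ⊢
      exact (pv_mem_ev_iff d u i).mp hi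
  · have hperm := PySem.List.sorted_perm ((PySem.Set.ofList (pvQs d u)).map
      (fun i => (i, ((pvQs d u).count i : Int)))) (fun p => p.1) false
    have hndL : ((PySem.List.sorted ((PySem.Set.ofList (pvQs d u)).map
        (fun i => (i, ((pvQs d u).count i : Int)))) (fun p => p.1) false).map Prod.fst).Nodup :=
      ((hperm.map Prod.fst).nodup_iff).mpr hfst
    have hle := PySem.List.sorted_pairwise ((PySem.Set.ofList (pvQs d u)).map
      (fun i => (i, ((pvQs d u).count i : Int)))) (fun p => p.1)
    have hne2 : (PySem.List.sorted ((PySem.Set.ofList (pvQs d u)).map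
        (fun i => (i, ((pvQs d u).count i : Int)))) (fun p => p.1) false).Pairwise
        (fun a b => a.1 ≠ b.1) := List.pairwise_map.mp hndL
    exact (hle.and hne2).imp (fun h => lt_of_le_of_ne h.1 h.2)
  · intro p hp
    rw [PySem.List.mem_sorted] at hp
    rcases List.mem_map.mp hp with ⟨i, hi, rfl⟩
    rw [PySem.Set.mem_ofList] at hi
    have hcp := List.count_pos_iff.mpr hi
    show (1 : Int) ≤ ((pvQs d u).count i : Int)
    exact_mod_cast hcp

theorem pv_main (adj_list : List (Int × List Int)) :
    adjac_list_recommend adj_list = adjac_list_recommend_alt adj_list := by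
  unfold adjac_list_recommend adjac_list_recommend_alt pvRecommendDict
  apply congrArg PySem.Dict.items
  apply PySem.List.foldl_congr_mem
  intro rec u hu
  have hu' : u ∈ (pvCompleteDict adj_list).keys := (PySem.List.mem_sorted _ _ _ _).mp hu
  exact congrArg (rec.insert u)
    (pv_peru (pvCompleteDict adj_list) u (pv_keys_nodup adj_list) hu')

-- ===== VERDICT (by name: the statement is the Claim_ definition above) =====
theorem adjac_list_recommend_spec : Claim_equal_adjac_list_recommend := by
  intro adj_list _
  unfold Spec_adjac_list_recommend
  exact pv_main adj_list
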